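-- pv_equiv track=rewrite | github.com/tosin2013/code-index-mcp | src/code_index_mcp/tools/scip/analyzers/objc_analyzer.py | _extract_method_labels
-- ===== SOURCE A (Python) =====
-- from typing import Dict, List, Optional, Any, Set
--
-- def _extract_method_labels(signature: str) -> List[str]:
--     """
--     Extract Objective-C method labels from signature.
--
--     Args:
--         signature: Method signature string
--
--     Returns:
--         List of method labels
--     """
--     try:
--         # Parse Objective-C method signature like: "-(void)setName:(NSString*)name withAge:(int)age"
--         labels = []
--         parts = signature.split(':')
--         for part in parts[:-1]:  # Exclude last part after final :
--             # Extract the label (word before the colon)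
--             words = part.strip().split()
--             if words:
--                 label = words[-1]
--                 if label and not label.startswith('(') and not label.startswith('-') and not label.startswith('+'):
--                     labels.append(label)
--         return labels
--     except Exception:
--         return []
-- ===== SOURCE B (Python) =====
-- from typing import List
--
-- def _extract_method_labels(signature: str) -> List[str]:
--     """Single left-to-right scan: track the current word; a colon emits it."""
--     labels = []
--     buf = []
--     in_word = False
--     for ch in signature:
--         if ch == ':':
--             if buf and buf[0] not in '(-+':
--                 labels.append(''.join(buf))
--             buf = []
--             in_word = False
--         elif ch.isspace():
--             in_word = False
--         else:
--             if not in_word: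
--                 buf = []
--             buf.append(ch)
--             in_word = True
--     return labels
-- ===== Notes on version B (the rewrite author's own statement) =====
-- stated objective: alternative
-- what changed: Replaces A's split-on-colon followed by a per-part strip()/split() pass with a single left-to-right character scan that tracks the current word in a small state machine and emits it at each colon.
import Mathlib
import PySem

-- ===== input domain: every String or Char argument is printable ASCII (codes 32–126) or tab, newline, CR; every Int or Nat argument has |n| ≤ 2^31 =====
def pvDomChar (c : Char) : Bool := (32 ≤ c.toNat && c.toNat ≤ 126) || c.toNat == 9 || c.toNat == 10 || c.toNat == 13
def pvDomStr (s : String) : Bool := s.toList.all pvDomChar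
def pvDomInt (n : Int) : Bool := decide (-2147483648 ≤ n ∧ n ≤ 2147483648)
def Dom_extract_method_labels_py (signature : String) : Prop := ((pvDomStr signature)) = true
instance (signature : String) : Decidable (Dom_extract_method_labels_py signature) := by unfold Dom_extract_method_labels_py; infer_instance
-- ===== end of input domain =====

-- B replaces A's split-on-colon + per-part strip/split passes by a single left-to-right
-- character scan that tracks the current word and emits it at each colon (objective: alternative).

-- ===== PORT A =====
-- per-part body of A's loop (A's try/except can never fire on a str argument; ported without it)
def aEmit (labels : List String) (part : String) : List String :=
  let words := PySem.Str.split₀ (PySem.Str.strip part)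
  if words.isEmpty then labels
  else
    let label := PySem.List.pyGetD words (-1) ""
    if !(label == "") && !(PySem.Str.startswith label "(")
        && !(PySem.Str.startswith label "-") && !(PySem.Str.startswith label "+")
    then labels ++ [label] else labels

def extract_method_labels_py (signature : String) : List String :=
  let parts := (PySem.Str.split? signature ":").getD []
  (PySem.List.slice parts none (some (-1))).foldl aEmit []

-- ===== PORT B =====
-- B's loop body: state = (labels so far, current word, inside-a-word flag)
def altStep (st : List String × List Char × Bool) (c : Char) : List String × List Char × Bool :=
  match st with
  | (labels, cur, inWord) =>
    if c = ':' then
      (match cur with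
       | [] => labels
       | c0 :: _ => if c0 = '(' ∨ c0 = '-' ∨ c0 = '+' then labels
                    else labels ++ [String.ofList cur],
       [], false)
    else if PySem.Chars.isspace c then (labels, cur, false)
    else (labels, if inWord then cur ++ [c] else [c], true)

def extract_method_labels_py_alt (signature : String) : List String :=
  (signature.toList.foldl altStep ([], [], false)).1

-- ===== PRECONDITION & SPEC =====
def Spec_extract_method_labels_py (signature : String) (out : List String) : Prop := out = extract_method_labels_py_alt signature
instance (signature : String) (out : List String) : Decidable (Spec_extract_method_labels_py signature out) := by unfold Spec_extract_method_labels_py; infer_instance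

-- ===== CLAIM (what is proved, stated in full; the proofs are below) =====
def Claim_equal_extract_method_labels_py : Prop := ∀ (signature : String), Dom_extract_method_labels_py signature → Spec_extract_method_labels_py signature (extract_method_labels_py signature)

-- ===== LEMMAS AND PROOFS =====

lemma go_nil (cur : List Char) (acc : List (List Char)) :
    PySem.Chars.split₀.go [] cur acc = if cur.isEmpty then acc.reverse else (cur.reverse :: acc).reverse := by
  simp [PySem.Chars.split₀.go]

lemma go_cons (c : Char) (rest cur : List Char) (acc : List (List Char)) :
    PySem.Chars.split₀.go (c :: rest) cur acc =
      if PySem.Chars.isspace c then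
        (if cur.isEmpty then PySem.Chars.split₀.go rest [] acc
         else PySem.Chars.split₀.go rest [] (cur.reverse :: acc))
      else PySem.Chars.split₀.go rest (c :: cur) acc := by
  by_cases hs : PySem.Chars.isspace c <;> by_cases h : cur.isEmpty <;>
    simp [PySem.Chars.split₀.go, hs, h]

lemma go_acc (l : List Char) : ∀ (cur : List Char) (acc : List (List Char)),
    PySem.Chars.split₀.go l cur acc = acc.reverse ++ PySem.Chars.split₀.go l cur [] := by
  induction l with
  | nil =>
    intro cur acc
    by_cases h : cur.isEmpty <;> simp [go_nil, h]
  | cons c rest ih =>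
    intro cur acc
    by_cases hs : PySem.Chars.isspace c
    · by_cases h : cur.isEmpty
      · rw [go_cons, go_cons]; simp only [hs, h, if_true]
        exact ih [] acc
      · rw [go_cons, go_cons]; simp only [hs, h, if_true, if_false, Bool.false_eq_true]
        rw [ih [] (cur.reverse :: acc), ih [] [cur.reverse]]
        simp
    · rw [go_cons, go_cons]; simp only [hs, Bool.false_eq_true, if_false]
      exact ih _ _

lemma go_ne_nil_mem (l : List Char) : ∀ (cur : List Char) (acc : List (List Char)),
    ([] ∉ acc) → [] ∉ PySem.Chars.split₀.go l cur acc := by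
  induction l with
  | nil =>
    intro cur acc hacc
    by_cases h : cur.isEmpty
    · simpa [go_nil, h] using hacc
    · rw [go_nil]
      simp only [h, Bool.false_eq_true, if_false, List.mem_reverse, List.mem_cons]
      rintro (h1 | h2)
      · have : cur = [] := by simpa using h1.symm
        simp [this] at h
      · exact hacc h2
  | cons c rest ih =>
    intro cur acc hacc
    rw [go_cons]
    by_cases hs : PySem.Chars.isspace c
    · by_cases h : cur.isEmpty
      · simp only [hs, h, if_true]; exact ih [] acc hacc
      · simp only [hs, h, if_true, Bool.false_eq_true, if_false]
        refine ih [] _ ?_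
        simp only [List.mem_cons]
        rintro (h1 | h2)
        · have : cur = [] := by simpa using h1.symm
          simp [this] at h
        · exact hacc h2
    · simp only [hs, Bool.false_eq_true, if_false]; exact ih _ _ hacc

lemma go_ne_nil (l : List Char) : ∀ (cur : List Char) (acc : List (List Char)),
    (cur ≠ [] ∨ acc ≠ []) → PySem.Chars.split₀.go l cur acc ≠ [] := by
  induction l with
  | nil =>
    intro cur acc h
    rw [go_nil]
    rcases h with h | h
    · simp [List.isEmpty_iff, h]
    · by_cases hc : cur.isEmpty <;> simp [hc, h]
  | cons c rest ih =>
    intro cur acc h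
    rw [go_cons]
    by_cases hs : PySem.Chars.isspace c
    · by_cases hc : cur.isEmpty
      · have hcur : cur = [] := by simpa [List.isEmpty_iff] using hc
        simp only [hs, hc, if_true]
        rcases h with h | h
        · exact absurd hcur h
        · exact ih [] acc (Or.inr h)
      · simp only [hs, hc, if_true, Bool.false_eq_true, if_false]
        exact ih [] _ (Or.inr (by simp))
    · simp only [hs, Bool.false_eq_true, if_false]
      exact ih (c :: cur) acc (Or.inl (by simp))

lemma scan_seg (l : List Char) : (':' ∉ l) → ∀ (cur curB : List Char) (labels : List String),
    (cur ≠ [] → curB = cur.reverse) →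
    (l.foldl altStep (labels, curB, !cur.isEmpty)).1 = labels ∧
    (l.foldl altStep (labels, curB, !cur.isEmpty)).2.1 =
      (PySem.Chars.split₀.go l cur []).getLast?.getD (if cur.isEmpty then curB else []) := by
  induction l with
  | nil =>
    intro hnc cur curB labels hrel
    cases cur with
    | nil => simp [go_nil]
    | cons c0 cs =>
      rw [hrel (by simp)]
      constructor
      · simp
      · rw [go_nil]; simp
  | cons c rest ih =>
    intro hnc cur curB labels hrel
    have hc : c ≠ ':' := by intro h; exact hnc (by simp [h])
    have hnc' : ':' ∉ rest := fun h => hnc (List.mem_cons_of_mem _ h)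
    rw [List.foldl_cons, go_cons]
    by_cases hs : PySem.Chars.isspace c
    · have hstep : altStep (labels, curB, !cur.isEmpty) c = (labels, curB, false) := by
        simp [altStep, hc, hs]
      rw [hstep]
      have H := ih hnc' [] curB labels (by simp)
      simp only [List.isEmpty_nil, Bool.not_true, if_true] at H
      by_cases h : cur.isEmpty
      · have hcur : cur = [] := by simpa [List.isEmpty_iff] using h
        subst hcur
        simpa [hs] using H
      · have hcur : cur ≠ [] := by simpa [List.isEmpty_iff] using h
        simp only [hs, h, if_true, Bool.false_eq_true, if_false]
        refine ⟨H.1, ?_⟩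
        rw [H.2, go_acc rest [] [cur.reverse], List.getLast?_append]
        cases hgo : (PySem.Chars.split₀.go rest [] []).getLast? with
        | none => simp [hrel hcur]
        | some x => simp
    · have hstep : altStep (labels, curB, !cur.isEmpty) c
          = (labels, if !cur.isEmpty then curB ++ [c] else [c], true) := by
        simp [altStep, hc, hs]
      rw [hstep]
      simp only [hs, Bool.false_eq_true, if_false]
      have hrel' : (c :: cur ≠ []) → (if !cur.isEmpty then curB ++ [c] else [c]) = (c :: cur).reverse := by
        intro _
        by_cases h : cur.isEmpty
        · have hcur : cur = [] := by simpa [List.isEmpty_iff] using h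
          subst hcur; simp
        · rw [hrel (by simpa [List.isEmpty_iff] using h)]
          simp [h]
      have H := ih hnc' (c :: cur) (if !cur.isEmpty then curB ++ [c] else [c]) labels hrel'
      simp only [List.isEmpty_cons, Bool.not_false, Bool.false_eq_true, if_false] at H
      refine ⟨H.1, ?_⟩
      rw [H.2]
      have hne := go_ne_nil rest (c :: cur) [] (Or.inl (by simp))
      cases hgo : (PySem.Chars.split₀.go rest (c :: cur) []).getLast? with
      | none => exact absurd (List.getLast?_eq_none_iff.mp hgo) hne
      | some x => simp

lemma go_spaces (sp : List Char) (hsp : ∀ c ∈ sp, PySem.Chars.isspace c = true) :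
    ∀ (cur : List Char) (acc : List (List Char)),
    PySem.Chars.split₀.go sp cur acc = PySem.Chars.split₀.go [] cur acc := by
  induction sp with
  | nil => intro cur acc; rfl
  | cons c rest ih =>
    intro cur acc
    have hs : PySem.Chars.isspace c = true := hsp c (by simp)
    have hsp' : ∀ c ∈ rest, PySem.Chars.isspace c = true := fun c hc => hsp c (by simp [hc])
    rw [go_cons]
    by_cases hc : cur.isEmpty
    · have hcur : cur = [] := by simpa [List.isEmpty_iff] using hc
      subst hcur
      simp only [hs, if_true, List.isEmpty_nil]
      rw [ih hsp' [] acc]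
    · simp only [hs, hc, if_true, Bool.false_eq_true, if_false]
      rw [ih hsp' [] (cur.reverse :: acc)]
      rw [go_nil, go_nil]
      simp [hc]

lemma go_append_spaces (sp : List Char) (hsp : ∀ c ∈ sp, PySem.Chars.isspace c = true)
    (l : List Char) : ∀ (cur : List Char) (acc : List (List Char)),
    PySem.Chars.split₀.go (l ++ sp) cur acc = PySem.Chars.split₀.go l cur acc := by
  induction l with
  | nil => intro cur acc; simpa using go_spaces sp hsp cur acc
  | cons c rest ih =>
    intro cur acc
    rw [List.cons_append, go_cons, go_cons]
    by_cases hs : PySem.Chars.isspace c <;> by_cases hc : cur.isEmpty <;>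
      simp [hs, hc, ih]

lemma go_dropWhile (l : List Char) (acc : List (List Char)) :
    PySem.Chars.split₀.go (l.dropWhile PySem.Chars.isspace) [] acc = PySem.Chars.split₀.go l [] acc := by
  induction l with
  | nil => rfl
  | cons c rest ih =>
    by_cases hs : PySem.Chars.isspace c
    · rw [List.dropWhile_cons_of_pos hs, ih, go_cons]
      simp [hs]
    · rw [List.dropWhile_cons_of_neg (by simp [hs])]

lemma split₀_strip (w : List Char) :
    PySem.Chars.split₀ (PySem.Chars.strip w) = PySem.Chars.split₀ w := by
  show PySem.Chars.split₀.go (PySem.Chars.strip w) [] [] = PySem.Chars.split₀.go w [] []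
  have hu : PySem.Chars.strip w = PySem.Chars.rstrip (PySem.Chars.lstrip w) := rfl
  set u := PySem.Chars.lstrip w with hudef
  have hdecomp : u = PySem.Chars.rstrip u ++ (u.reverse.takeWhile PySem.Chars.isspace).reverse := by
    show u = (u.reverse.dropWhile PySem.Chars.isspace).reverse ++ (u.reverse.takeWhile PySem.Chars.isspace).reverse
    rw [← List.reverse_append, ← List.takeWhile_append_dropWhile (p := PySem.Chars.isspace) (l := u.reverse)]
    simp
  have hsp : ∀ c ∈ (u.reverse.takeWhile PySem.Chars.isspace).reverse, PySem.Chars.isspace c = true := by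
    intro c hc
    exact List.mem_takeWhile_imp (by simpa using hc)
  rw [hu]
  calc PySem.Chars.split₀.go (PySem.Chars.rstrip u) [] []
      = PySem.Chars.split₀.go (PySem.Chars.rstrip u ++ (u.reverse.takeWhile PySem.Chars.isspace).reverse) [] [] :=
        (go_append_spaces _ hsp _ [] []).symm
    _ = PySem.Chars.split₀.go u [] [] := by rw [← hdecomp]
    _ = PySem.Chars.split₀.go w [] [] := go_dropWhile w []

def scanLast (w : List Char) : List Char :=
  (PySem.Chars.split₀.go w [] []).getLast?.getD []

def cEmit (labels : List String) (w : List Char) : List String :=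
  match scanLast w with
  | [] => labels
  | c0 :: rest => if c0 = '(' ∨ c0 = '-' ∨ c0 = '+' then labels
                  else labels ++ [String.ofList (c0 :: rest)]

lemma startswith_single (l : List Char) (c : Char) :
    PySem.Chars.startswith l [c] = (l.head? == some c) := by
  cases l with
  | nil => rfl
  | cons a t =>
    simp only [PySem.Chars.startswith, List.isPrefixOf, List.head?_cons]
    simp [BEq.comm]

lemma aEmit_eq (labels : List String) (part : String) :
    aEmit labels part = cEmit labels part.toList := by
  have hmap : List.map String.toList (PySem.Str.split₀ (PySem.Str.strip part))
      = PySem.Chars.split₀.go part.toList [] [] := by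
    rw [PySem.Str.split₀_map_toList, PySem.Str.toList_strip, split₀_strip]
    rfl
  set words := PySem.Str.split₀ (PySem.Str.strip part) with hw
  cases hwords : words with
  | nil =>
    have hW : PySem.Chars.split₀.go part.toList [] [] = [] := by
      rw [← hmap, hwords]; rfl
    unfold aEmit cEmit scanLast
    rw [← hw, hwords, hW]
    simp
  | cons w0 ws =>
    have hne : words ≠ [] := by rw [hwords]; simp
    have hWne : PySem.Chars.split₀.go part.toList [] [] ≠ [] := by
      rw [← hmap]
      simp [hwords]
    have hlabel : (PySem.List.pyGetD words (-1) "").toList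
        = (PySem.Chars.split₀.go part.toList [] []).getLast hWne := by
      have h1 : PySem.List.pyGetD (List.map String.toList words) (-1) ("".toList)
          = (PySem.List.pyGetD words (-1) "").toList :=
        PySem.List.pyGetD_map String.toList words (-1) ""
      rw [hmap] at h1
      rw [← h1]
      exact PySem.List.pyGetD_neg_one _ _ hWne
    have hscan : scanLast part.toList = (PySem.Chars.split₀.go part.toList [] []).getLast hWne := by
      unfold scanLast
      rw [List.getLast?_eq_some_getLast hWne]
      rfl
    have hscan_ne : scanLast part.toList ≠ [] := by
      rw [hscan]
      intro hnil
      have hmem := List.getLast_mem hWne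
      rw [hnil] at hmem
      exact go_ne_nil_mem part.toList [] [] (by simp) hmem
    have hlabel' : PySem.List.pyGetD words (-1) "" = String.ofList (scanLast part.toList) := by
      rw [hscan, ← hlabel, String.ofList_toList]
    cases hsc : scanLast part.toList with
    | nil => exact absurd hsc hscan_ne
    | cons c0 rest =>
      unfold aEmit cEmit
      rw [← hw, hwords]
      simp only [List.isEmpty_cons, Bool.false_eq_true, if_false]
      rw [← hwords, hlabel', hsc]
      have hne0 : (String.ofList (c0 :: rest) == "") = false := by
        apply beq_eq_false_iff_ne.mpr
        intro h
        have := congrArg String.toList h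
        simp at this
      have hsw : ∀ c : Char, PySem.Str.startswith (String.ofList (c0 :: rest)) (String.ofList [c]) = (c0 == c) := by
        intro c
        rw [PySem.Str.startswith_eq]
        simp only [String.toList_ofList]
        rw [startswith_single]
        simp
      have h1 := hsw '('
      have h2 := hsw '-'
      have h3 := hsw '+'
      have e1 : (String.ofList ['(']) = "(" := rfl
      have e2 : (String.ofList ['-']) = "-" := rfl
      have e3 : (String.ofList ['+']) = "+" := rfl
      rw [e1] at h1; rw [e2] at h2; rw [e3] at h3
      rw [hne0, h1, h2, h3]
      by_cases hc : c0 = '(' ∨ c0 = '-' ∨ c0 = '+'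
      · rcases hc with h | h | h <;> simp [h]
      · push Not at hc
        simp [hc.1, hc.2.1, hc.2.2]

lemma goS_zero (l cur : List Char) (acc : List (List Char)) :
    PySem.Chars.splitOn.go [':'] 0 l cur acc = ((cur.reverse ++ l) :: acc).reverse := by
  simp [PySem.Chars.splitOn.go]

lemma goS_nil (fuel : Nat) (cur : List Char) (acc : List (List Char)) :
    PySem.Chars.splitOn.go [':'] fuel [] cur acc = (cur.reverse :: acc).reverse := by
  cases fuel <;> simp [PySem.Chars.splitOn.go]

lemma goS_cons (fuel : Nat) (c : Char) (rest cur : List Char) (acc : List (List Char)) :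
    PySem.Chars.splitOn.go [':'] (fuel + 1) (c :: rest) cur acc =
      if c = ':' then PySem.Chars.splitOn.go [':'] fuel rest [] (cur.reverse :: acc)
      else PySem.Chars.splitOn.go [':'] fuel rest (c :: cur) acc := by
  by_cases h : c = ':'
  · subst h
    simp [PySem.Chars.splitOn.go, List.isPrefixOf]
  · have : ((':' : Char) == c) = false := by simp [BEq.comm, h]
    simp [PySem.Chars.splitOn.go, List.isPrefixOf, this, h]

lemma goS_ne_nil (fuel : Nat) : ∀ (l cur : List Char) (acc : List (List Char)),
    PySem.Chars.splitOn.go [':'] fuel l cur acc ≠ [] := by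
  induction fuel with
  | zero => intro l cur acc; rw [goS_zero]; simp
  | succ f ih =>
    intro l cur acc
    cases l with
    | nil => rw [goS_nil]; simp
    | cons c rest =>
      rw [goS_cons]
      by_cases h : c = ':' <;> simp [h, ih]

lemma goS_acc (fuel : Nat) : ∀ (l cur : List Char) (acc : List (List Char)),
    PySem.Chars.splitOn.go [':'] fuel l cur acc
      = acc.reverse ++ PySem.Chars.splitOn.go [':'] fuel l cur [] := by
  induction fuel with
  | zero => intro l cur acc; rw [goS_zero, goS_zero]; simp
  | succ f ih =>
    intro l cur acc
    cases l with
    | nil => rw [goS_nil, goS_nil]; simp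
    | cons c rest =>
      rw [goS_cons, goS_cons]
      by_cases h : c = ':'
      · simp only [h, if_true]
        rw [ih rest [] (cur.reverse :: acc), ih rest [] [cur.reverse]]
        simp
      · simp only [h, if_false]
        exact ih rest (c :: cur) acc

lemma goS_no_colon (l : List Char) : (':' ∉ l) → ∀ (fuel : Nat), l.length ≤ fuel →
    ∀ (cur : List Char) (acc : List (List Char)),
    PySem.Chars.splitOn.go [':'] fuel l cur acc = ((cur.reverse ++ l) :: acc).reverse := by
  induction l with
  | nil => intro _ fuel _ cur acc; rw [goS_nil]; simp
  | cons c rest ih =>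
    intro hnc fuel hlen cur acc
    have hc : c ≠ ':' := fun h => hnc (by simp [h])
    obtain ⟨f, rfl⟩ : ∃ f, fuel = f + 1 := ⟨fuel - 1, by simp only [List.length_cons] at hlen; omega⟩
    rw [goS_cons]
    simp only [hc, if_false]
    rw [ih (fun h => hnc (List.mem_cons_of_mem _ h)) f (by simp only [List.length_cons] at hlen; omega) (c :: cur) acc]
    simp

lemma goS_colon (w : List Char) : (':' ∉ w) → ∀ (t : List Char) (fuel : Nat), w.length < fuel →
    ∀ (cur : List Char) (acc : List (List Char)),
    PySem.Chars.splitOn.go [':'] fuel (w ++ ':' :: t) cur acc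
      = PySem.Chars.splitOn.go [':'] (fuel - (w.length + 1)) t [] ((cur.reverse ++ w) :: acc) := by
  induction w with
  | nil =>
    intro _ t fuel hlen cur acc
    obtain ⟨f, rfl⟩ : ∃ f, fuel = f + 1 := ⟨fuel - 1, by omega⟩
    rw [List.nil_append, goS_cons]
    simp
  | cons c rest ih =>
    intro hnc t fuel hlen cur acc
    have hc : c ≠ ':' := fun h => hnc (by simp [h])
    obtain ⟨f, rfl⟩ : ∃ f, fuel = f + 1 := ⟨fuel - 1, by simp only [List.length_cons] at hlen; omega⟩
    rw [List.cons_append, goS_cons]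
    simp only [hc, if_false]
    rw [ih (fun h => hnc (List.mem_cons_of_mem _ h)) t f (by simp only [List.length_cons] at hlen; omega) (c :: cur) acc]
    have e1 : f - (rest.length + 1) = f + 1 - ((c :: rest).length + 1) := by
      simp only [List.length_cons]; omega
    have e2 : (c :: cur).reverse ++ rest = cur.reverse ++ c :: rest := by simp
    rw [e2, e1]

lemma splitOn_no_colon (l : List Char) (h : ':' ∉ l) :
    PySem.Chars.splitOn l [':'] = [l] := by
  show PySem.Chars.splitOn.go [':'] (l.length + 1) l [] [] = [l]
  rw [goS_no_colon l h (l.length + 1) (by omega) [] []]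
  simp

lemma splitOn_cons (w t : List Char) (h : ':' ∉ w) :
    PySem.Chars.splitOn (w ++ ':' :: t) [':'] = w :: PySem.Chars.splitOn t [':'] := by
  show PySem.Chars.splitOn.go [':'] ((w ++ ':' :: t).length + 1) (w ++ ':' :: t) [] []
      = w :: PySem.Chars.splitOn.go [':'] (t.length + 1) t [] []
  rw [goS_colon w h t _ (by simp only [List.length_append, List.length_cons]; omega) [] []]
  have harith : (w ++ ':' :: t).length + 1 - (w.length + 1) = t.length + 1 := by
    simp only [List.length_append, List.length_cons]; omega
  rw [harith, goS_acc]
  simp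

lemma splitOn_ne_nil (l : List Char) : PySem.Chars.splitOn l [':'] ≠ [] :=
  goS_ne_nil _ l [] []

lemma altStep_colon (labels : List String) (cur : List Char) (i : Bool) (w : List Char)
    (h : cur = scanLast w) : altStep (labels, cur, i) ':' = (cEmit labels w, [], false) := by
  subst h
  cases hsc : scanLast w <;> simp [altStep, cEmit, hsc]

lemma main_scan : ∀ (n : Nat) (cs : List Char) (labels : List String), cs.length ≤ n →
    (cs.foldl altStep (labels, [], false)).1
      = ((PySem.Chars.splitOn cs [':']).dropLast).foldl cEmit labels := by
  intro n
  induction n with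
  | zero =>
    intro cs labels hlen
    have : cs = [] := List.length_eq_zero_iff.mp (by omega)
    subst this
    rw [splitOn_no_colon [] (by simp)]
    simp
  | succ n ih =>
    intro cs labels hlen
    by_cases hmem : ':' ∈ cs
    · set p : Char → Bool := (fun c => !(c == ':')) with hp
      set w := cs.takeWhile p with hwdef
      set d := cs.dropWhile p with hddef
      have hdne : d ≠ [] := by
        intro h
        have := List.dropWhile_eq_nil_iff.mp h ':' hmem
        simp [hp] at this
      have hhead : d.head hdne = ':' := by
        have := List.head_dropWhile_not p hdne
        simpa [hp] using this
      set t := d.tail with htdef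
      have hd : d = ':' :: t := by
        rw [htdef, ← hhead]
        exact (List.cons_head_tail hdne).symm
      have hcs : cs = w ++ ':' :: t := by
        rw [← hd, hwdef, hddef, List.takeWhile_append_dropWhile]
      have hwnc : ':' ∉ w := by
        intro h
        have := List.mem_takeWhile_imp h
        simp [hp] at this
      have hlent : t.length ≤ n := by
        have : cs.length = w.length + 1 + t.length := by
          rw [hcs]; simp; omega
        omega
      rw [hcs, List.foldl_append, List.foldl_cons]
      have hseg := scan_seg w hwnc [] [] labels (by simp)
      simp only [List.isEmpty_nil, Bool.not_true] at hseg
      rcases hs1 : (w.foldl altStep (labels, [], false)) with ⟨l1, c1, i1⟩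
      rw [hs1] at hseg
      have hl1 : l1 = labels := hseg.1
      have hc1 : c1 = scanLast w := by
        have := hseg.2
        simpa [scanLast] using this
      rw [hl1, altStep_colon labels c1 i1 w hc1]
      rw [ih t (cEmit labels w) hlent]
      rw [splitOn_cons w t hwnc, List.dropLast_cons_of_ne_nil (splitOn_ne_nil t), List.foldl_cons]
    · rw [splitOn_no_colon cs hmem]
      simp only [List.dropLast_singleton, List.foldl_nil]
      have := (scan_seg cs hmem [] [] labels (by simp)).1
      simpa using this

-- ===== VERDICT (by name: the statement is the Claim_ definition above) =====
theorem extract_method_labels_py_spec : Claim_equal_extract_method_labels_py := by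
  intro signature _
  unfold Spec_extract_method_labels_py
  obtain ⟨parts, hparts, hmap⟩ :
      ∃ parts, PySem.Str.split? signature ":" = some parts ∧
        List.map String.toList parts = PySem.Chars.splitOn signature.toList [':'] := by
    have h := PySem.Str.split?_map signature ":"
    cases ho : PySem.Str.split? signature ":" with
    | none =>
      rw [ho] at h
      simp [PySem.Chars.split?] at h
    | some parts =>
      rw [ho] at h
      refine ⟨parts, rfl, ?_⟩
      simpa [PySem.Chars.split?] using h
  unfold extract_method_labels_py
  rw [hparts]
  simp only [Option.getD_some, PySem.List.slice_to_neg_one]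
  have hfun : aEmit = fun (l : List String) (p : String) => cEmit l p.toList :=
    funext fun l => funext fun p => aEmit_eq l p
  rw [hfun]
  rw [← List.foldl_map (f := String.toList) (g := cEmit), List.map_dropLast, hmap]
  exact (main_scan signature.toList.length signature.toList [] (le_refl _)).symm
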